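-- pv_equiv track=rewrite | github.com/pikorua/NielsenTransforms | NielsenTransforms.py | OnlyVariables
-- ===== SOURCE A (Python) =====
-- variables = ['A', 'B', 'C', 'D', 'E', 'F', 'G', 'H', 'I', 'J', 'K', 'L', 'M', 'N', 'O', 'P', 'Q', 'R', 'S', 'T', 'U',
--              'V', 'W','X', 'Y', 'Z','1', '2', '3', '4', '5', '6', '7', '8', '9', '0' ]
--
-- def OnlyVariables(Text): # returns true if text contains only variables
--     s = ""
--     tmp = Text
--     for i in range(len(Text)):
--         s = s + Text[i]
--         if s in variables:
--             tmp = tmp.replace(s, "")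
--             s = ""
--     if len(tmp) > 0:
--         return False
--     else:
--         return True
-- ===== SOURCE B (Python) =====
-- def OnlyVariables(Text):
--     return all('A' <= c <= 'Z' or '0' <= c <= '9' for c in Text)
-- ===== Notes on version B (the rewrite author's own statement) =====
-- stated objective: faster
-- what changed: B replaces A's accumulate-then-delete loop (building a candidate string, testing membership in the variables list, and erasing matched characters from a shrinking copy with str.replace, which rescans tmp at every step) by a single O(n) pass that range-checks each character ('A'<=c<='Z' or '0'<=c<='9').
import Mathlib
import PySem

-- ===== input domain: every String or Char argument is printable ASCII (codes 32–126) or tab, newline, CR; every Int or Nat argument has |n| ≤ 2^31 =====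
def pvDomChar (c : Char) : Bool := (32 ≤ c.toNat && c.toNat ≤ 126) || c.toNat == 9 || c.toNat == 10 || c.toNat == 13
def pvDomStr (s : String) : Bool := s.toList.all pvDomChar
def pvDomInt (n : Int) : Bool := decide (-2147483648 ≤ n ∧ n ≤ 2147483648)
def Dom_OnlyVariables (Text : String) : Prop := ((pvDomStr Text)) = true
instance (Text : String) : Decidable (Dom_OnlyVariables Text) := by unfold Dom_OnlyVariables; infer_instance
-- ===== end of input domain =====

-- B validates each character by a range comparison in one pass instead of A's
-- accumulate-and-delete loop; simpler, same return value on every admitted input.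

-- ===== PORT A =====
-- the module-level list `variables` (one-character strings, as lists of chars)
def varList : List (List Char) :=
  [['A'], ['B'], ['C'], ['D'], ['E'], ['F'], ['G'], ['H'], ['I'], ['J'], ['K'], ['L'], ['M'],
   ['N'], ['O'], ['P'], ['Q'], ['R'], ['S'], ['T'], ['U'], ['V'], ['W'], ['X'], ['Y'], ['Z'],
   ['1'], ['2'], ['3'], ['4'], ['5'], ['6'], ['7'], ['8'], ['9'], ['0']]

-- one iteration of A's for-loop: state = (s, tmp)
def pvStepA (st : List Char × List Char) (c : Char) : List Char × List Char :=
  let s := st.1 ++ [c]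
  if varList.contains s then ([], PySem.Chars.replace st.2 s []) else (s, st.2)

def OnlyVariables (Text : String) : Bool :=
  let T := Text.toList
  let st := (PySem.List.pyRange 0 (PySem.Str.len Text) 1).foldl
      (fun st i => pvStepA st (PySem.List.pyGetD T i 'A')) ([], T)
  if 0 < st.2.length then false else true

-- ===== PORT B =====
-- B's per-character test: 'A' <= c <= 'Z' or '0' <= c <= '9'
def pvValid (c : Char) : Bool := (('A' ≤ c) && (c ≤ 'Z')) || (('0' ≤ c) && (c ≤ '9'))

def OnlyVariables_alt (Text : String) : Bool := Text.toList.all pvValid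

-- ===== PRECONDITION & SPEC =====
def Spec_OnlyVariables (Text : String) (out : Bool) : Prop := out = OnlyVariables_alt Text
instance (Text : String) (out : Bool) : Decidable (Spec_OnlyVariables Text out) := by unfold Spec_OnlyVariables; infer_instance

-- ===== CLAIM (what is proved, stated in full; the proofs are below) =====
def Claim_equal_OnlyVariables : Prop := ∀ (Text : String), Dom_OnlyVariables Text → Spec_OnlyVariables Text (OnlyVariables Text)

-- ===== LEMMAS AND PROOFS =====

-- `s in variables` for a single (ASCII-domain) character is exactly B's range test
lemma contains_singleton_small (c : Char) (h : c.toNat < 127) :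
    varList.contains [c] = pvValid c := by
  have key : ∀ n < 127, varList.contains [Char.ofNat n] = pvValid (Char.ofNat n) := by decide
  have := key c.toNat h
  rwa [Char.ofNat_toNat] at this

-- every member of `variables` has length 1
lemma varList_len_one : ∀ l ∈ varList, l.length = 1 := by decide

lemma varList_contains_long (s : List Char) (h : s ≠ []) (c : Char) :
    varList.contains (s ++ [c]) = false := by
  by_contra hcon
  have hmem : (s ++ [c]) ∈ varList := by
    have := Bool.of_not_eq_false hcon
    simpa using this
  have h1 := varList_len_one _ hmem
  simp only [List.length_append, List.length_cons, List.length_nil] at h1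
  exact h (List.eq_nil_of_length_eq_zero (by omega))

-- replace(tmp, "c", "") removes every occurrence of c
lemma replace_go_filter (c : Char) :
    ∀ (fuel : Nat) (l acc : List Char), l.length ≤ fuel →
      PySem.Chars.replace.go [c] [] fuel l acc = acc.reverse ++ l.filter (· ≠ c) := by
  intro fuel
  induction fuel with
  | zero =>
    intro l acc hl
    have : l = [] := List.eq_nil_of_length_eq_zero (Nat.le_zero.mp hl)
    subst this
    simp [PySem.Chars.replace.go]
  | succ n ih =>
    intro l acc hl
    cases l with
    | nil => simp [PySem.Chars.replace.go]
    | cons d t =>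
      simp only [List.length_cons] at hl
      by_cases hd : c = d
      · subst hd
        have hpre : List.isPrefixOf [c] (c :: t) = true := by simp [List.isPrefixOf]
        rw [PySem.Chars.replace.go, if_pos hpre]
        simp only [List.length_cons, List.length_nil, List.drop_succ_cons, List.drop_zero,
          List.reverse_nil, List.nil_append]
        rw [ih _ _ (by omega)]
        simp
      · have hpre : List.isPrefixOf [c] (d :: t) = false := by
          simp [List.isPrefixOf]; exact hd
        rw [PySem.Chars.replace.go, if_neg (by simp [hpre])]
        rw [ih _ _ (by omega)]
        simp [Ne.symm hd]

lemma replace_single (tmp : List Char) (c : Char) :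
    PySem.Chars.replace tmp [c] [] = tmp.filter (· ≠ c) := by
  rw [PySem.Chars.replace]
  rw [if_neg (by simp)]
  exact replace_go_filter c tmp.length tmp [] le_rfl

-- the fold while every character is valid: s stays empty, tmp gets filtered
lemma fold_valid (T : List Char) (hT : ∀ c ∈ T, pvValid c = true)
    (hsm : ∀ c ∈ T, c.toNat < 127) :
    ∀ tmp : List Char,
      T.foldl pvStepA ([], tmp) = ([], tmp.filter (fun x => !T.contains x)) := by
  induction T with
  | nil => intro tmp; simp
  | cons c t ih =>
    intro tmp
    have hc : pvValid c = true := hT c (by simp)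
    have hstep : pvStepA ([], tmp) c = ([], tmp.filter (· ≠ c)) := by
      simp only [pvStepA, List.nil_append]
      rw [contains_singleton_small c (hsm c (by simp)), hc]
      simp [replace_single]
    rw [List.foldl_cons, hstep,
      ih (fun d hd => hT d (by simp [hd])) (fun d hd => hsm d (by simp [hd]))]
    congr 1
    rw [List.filter_filter]
    apply List.filter_congr
    intro x _
    by_cases hx : x = c <;> simp [hx]

-- the fold once s is nonempty: nothing matches any more, tmp is frozen
lemma fold_stuck (T : List Char) :
    ∀ (s tmp : List Char), s ≠ [] →
      T.foldl pvStepA (s, tmp) = (s ++ T, tmp) := by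
  induction T with
  | nil => intro s tmp _; simp
  | cons c t ih =>
    intro s tmp hs
    have hstep : pvStepA (s, tmp) c = (s ++ [c], tmp) := by
      simp only [pvStepA]
      rw [varList_contains_long s hs c]
      simp
    rw [List.foldl_cons, hstep, ih _ _ (by simp)]
    simp

-- decomposition at the first invalid character
lemma exists_first_invalid (T : List Char) (h : ¬ (∀ c ∈ T, pvValid c = true)) :
    ∃ p c r, T = p ++ c :: r ∧ (∀ d ∈ p, pvValid d = true) ∧ pvValid c = false := by
  induction T with
  | nil => exact absurd (by simp) h
  | cons c t ih =>
    by_cases hc : pvValid c = true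
    · have ht : ¬ (∀ d ∈ t, pvValid d = true) := by
        intro hall
        apply h
        intro d hd
        rcases List.mem_cons.mp hd with h1 | h2
        · exact h1 ▸ hc
        · exact hall d h2
      obtain ⟨p, x, r, h1, h2, h3⟩ := ih ht
      refine ⟨c :: p, x, r, by simp [h1], ?_, h3⟩
      intro d hd
      rcases List.mem_cons.mp hd with h1' | h2'
      · exact h1' ▸ hc
      · exact h2 d h2'
    · exact ⟨[], c, t, by simp, by simp, Bool.eq_false_iff.mpr hc⟩

lemma main_eq (Text : String) (hdom : pvDomStr Text = true) :
    OnlyVariables Text = OnlyVariables_alt Text := by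
  have hsm : ∀ c ∈ Text.toList, c.toNat < 127 := by
    intro c hc
    have := (List.all_eq_true).mp hdom c hc
    simp only [pvDomChar, Bool.or_eq_true, Bool.and_eq_true, decide_eq_true_eq, beq_iff_eq] at this
    omega
  unfold OnlyVariables OnlyVariables_alt
  rw [show PySem.Str.len Text = ((Text.toList.length : Nat) : Int) by simp]
  change (if 0 < (List.foldl (fun st i => pvStepA st (PySem.List.pyGetD Text.toList i 'A'))
      ([], Text.toList) (PySem.List.pyRange 0 ((Text.toList.length : Nat) : Int) 1)).2.length
      then false else true) = Text.toList.all pvValid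
  rw [PySem.List.foldl_pyRange_zero_pyGetD' Text.toList 'A' pvStepA ([], Text.toList)]
  by_cases hall : ∀ c ∈ Text.toList, pvValid c = true
  · rw [fold_valid Text.toList hall hsm Text.toList]
    have hnil : Text.toList.filter (fun x => !Text.toList.contains x) = [] := by
      apply List.filter_eq_nil_iff.mpr
      intro x hx
      simp [hx]
    rw [hnil]
    simp only [List.length_nil, lt_irrefl, if_false]
    symm
    rw [List.all_eq_true]
    exact hall
  · obtain ⟨p, c, r, hsplit, hp, hc⟩ := exists_first_invalid Text.toList hall
    have hsm' : ∀ d ∈ p, d.toNat < 127 := by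
      intro d hd; exact hsm d (by rw [hsplit]; simp [hd])
    rw [hsplit, List.foldl_append]
    rw [fold_valid p hp hsm' (p ++ c :: r)]
    rw [List.foldl_cons]
    have hstep : pvStepA ([], (p ++ c :: r).filter (fun x => !p.contains x)) c
        = ([c], (p ++ c :: r).filter (fun x => !p.contains x)) := by
      simp only [pvStepA, List.nil_append]
      rw [contains_singleton_small c (hsm c (by rw [hsplit]; simp)), hc]
      simp
    rw [hstep, fold_stuck r [c] _ (by simp)]
    have hcmem : c ∈ (p ++ c :: r).filter (fun x => !p.contains x) := by
      apply List.mem_filter.mpr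
      refine ⟨by simp, ?_⟩
      simp only [Bool.not_eq_eq_eq_not, Bool.not_true, List.contains_eq_mem,
        decide_eq_false_iff_not]
      intro hcp
      exact absurd (hp c hcp) (by simp [hc])
    have hlen : 0 < ((p ++ c :: r).filter (fun x => !p.contains x)).length :=
      List.length_pos_of_mem hcmem
    rw [if_pos hlen]
    symm
    rw [List.all_eq_false]
    exact ⟨c, by simp, by simp [hc]⟩

-- ===== VERDICT (by name: the statement is the Claim_ definition above) =====
theorem OnlyVariables_spec : Claim_equal_OnlyVariables := by
  intro Text hdom
  unfold Spec_OnlyVariables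
  exact main_eq Text hdom
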